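-- pv_equiv track=rewrite | github.com/qiancai/ai-pr-translator | scripts/section_matcher.py | extract_intro_section_content_from_lines
-- ===== SOURCE A (Python) =====
-- def extract_intro_section_content_from_lines(target_lines):
--     """
--     Extract intro section content from target lines: from the first
--     top-level heading (#) to the line before the first level-2 heading (##).
--     Excludes frontmatter.
--     Returns: (intro_content, first_level2_line)
--     """
--     start_idx = None
--     for i, line in enumerate(target_lines):
--         if line.strip().startswith('# '):
--             start_idx = i
--             break
--
--     if start_idx is None:
--         return "", len(target_lines) + 1
--
--     intro_lines = []
--     first_level2_line = len(target_lines) + 1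
--     for i in range(start_idx, len(target_lines)):
--         if target_lines[i].strip().startswith('## '):
--             first_level2_line = i + 1  # 1-based
--             break
--         intro_lines.append(target_lines[i].rstrip())
--
--     intro_content = '\n'.join(intro_lines)
--     return intro_content, first_level2_line
-- ===== SOURCE B (Python) =====
-- def extract_intro_section_content_from_lines(target_lines):
--     started = False
--     collected = []
--     first_level2_line = None
--     for i, line in enumerate(target_lines):
--         if not started:
--             if line.strip().startswith('# '):
--                 started = True
--                 collected.append(line.rstrip())
--         else:
--             if line.strip().startswith('## '):
--                 first_level2_line = i + 1
--                 break
--             collected.append(line.rstrip())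
--     if not started:
--         return "", len(target_lines) + 1
--     if first_level2_line is None:
--         first_level2_line = len(target_lines) + 1
--     return '\n'.join(collected), first_level2_line
-- ===== Notes on version B (the rewrite author's own statement) =====
-- stated objective: alternative
-- what changed: Replaced A's two sequential loops (index search for the first '# ' heading, then an index-range scan with list indexing) by one linear pass over the lines with a started flag and no list indexing.
import Mathlib
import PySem

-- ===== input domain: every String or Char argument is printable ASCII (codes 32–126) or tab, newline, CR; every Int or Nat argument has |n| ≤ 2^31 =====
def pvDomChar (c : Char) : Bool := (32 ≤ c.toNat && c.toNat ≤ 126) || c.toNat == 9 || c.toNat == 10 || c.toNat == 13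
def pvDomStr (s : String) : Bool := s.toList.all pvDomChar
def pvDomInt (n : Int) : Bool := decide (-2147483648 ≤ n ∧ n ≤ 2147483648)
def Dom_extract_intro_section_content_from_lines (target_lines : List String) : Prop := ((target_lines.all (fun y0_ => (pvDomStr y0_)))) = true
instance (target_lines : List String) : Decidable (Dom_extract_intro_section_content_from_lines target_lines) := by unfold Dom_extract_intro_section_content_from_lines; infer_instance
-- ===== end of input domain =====

-- B replaces A's two sequential loops (index search then index-range scan) by one
-- linear pass with a 'started' flag and no list indexing (objective: alternative).

-- ===== PORT A =====
-- first loop: find the index of the first line whose strip() starts with '# '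
def pvAFind (lines : List String) (i : Nat) : Option Nat :=
  match lines with
  | [] => none
  | l :: rest =>
    if PySem.Str.startswith (PySem.Str.strip l) "# " then some i else pvAFind rest (i + 1)

-- second loop: for i in range(start_idx, len(target_lines)) with indexing and break
def pvALoop (target_lines : List String) (i : Nat) (intro_lines : List String) :
    List String × Int :=
  if _h : i < target_lines.length then
    match PySem.List.pyGet? target_lines (i : Int) with
    | none => (intro_lines, (target_lines.length : Int) + 1)  -- unreachable: i is in range
    | some line =>
      if PySem.Str.startswith (PySem.Str.strip line) "## " then
        (intro_lines, (i : Int) + 1)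
      else
        pvALoop target_lines (i + 1) (intro_lines ++ [PySem.Str.rstrip line])
  else (intro_lines, (target_lines.length : Int) + 1)
termination_by target_lines.length - i

def extract_intro_section_content_from_lines (target_lines : List String) : String × Int :=
  match pvAFind target_lines 0 with
  | none => ("", (target_lines.length : Int) + 1)
  | some start_idx =>
    let r := pvALoop target_lines start_idx []
    (PySem.Str.join "\n" r.1, r.2)

-- ===== PORT B =====
-- single pass: (started, collected, first_level2_line?)
def pvBLoop (lines : List String) (i : Nat) (started : Bool) (collected : List String) :
    Bool × List String × Option Int :=
  match lines with
  | [] => (started, collected, none)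
  | line :: rest =>
    if !started then
      if PySem.Str.startswith (PySem.Str.strip line) "# " then
        pvBLoop rest (i + 1) true (collected ++ [PySem.Str.rstrip line])
      else
        pvBLoop rest (i + 1) false collected
    else
      if PySem.Str.startswith (PySem.Str.strip line) "## " then
        (started, collected, some ((i : Int) + 1))
      else
        pvBLoop rest (i + 1) true (collected ++ [PySem.Str.rstrip line])

def extract_intro_section_content_from_lines_alt (target_lines : List String) : String × Int :=
  let r := pvBLoop target_lines 0 false []
  if !r.1 then ("", (target_lines.length : Int) + 1)
  else (PySem.Str.join "\n" r.2.1, r.2.2.getD ((target_lines.length : Int) + 1))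

-- ===== PRECONDITION & SPEC =====
def Spec_extract_intro_section_content_from_lines (target_lines : List String) (out : String × Int) : Prop := out = extract_intro_section_content_from_lines_alt target_lines
instance (target_lines : List String) (out : String × Int) : Decidable (Spec_extract_intro_section_content_from_lines target_lines out) := by unfold Spec_extract_intro_section_content_from_lines; infer_instance

-- ===== CLAIM (what is proved, stated in full; the proofs are below) =====
def Claim_equal_extract_intro_section_content_from_lines : Prop := ∀ (target_lines : List String), Dom_extract_intro_section_content_from_lines target_lines → Spec_extract_intro_section_content_from_lines target_lines (extract_intro_section_content_from_lines target_lines)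

-- ===== LEMMAS AND PROOFS =====

-- a string whose strip starts with "# " does not start with "## "
theorem pv_not_sharpsharp (s : String)
    (h : PySem.Str.startswith (PySem.Str.strip s) "# " = true) :
    PySem.Str.startswith (PySem.Str.strip s) "## " = false := by
  simp only [PySem.Str.startswith_eq] at h ⊢
  rw [PySem.Chars.startswith_iff] at h
  by_contra hc
  rw [Bool.not_eq_false, PySem.Chars.startswith_iff] at hc
  obtain ⟨t1, h1⟩ := h
  obtain ⟨t2, h2⟩ := hc
  have lit1 : "# ".toList = ['#', ' '] := rfl
  have lit2 : "## ".toList = ['#', '#', ' '] := rfl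
  rw [lit1] at h1
  rw [lit2] at h2
  have h3 : '#' :: ' ' :: t1 = '#' :: '#' :: ' ' :: t2 := by
    simpa using h1.trans h2.symm
  simp at h3

-- once started, B's flag stays true
theorem pv_bloop_started (lines : List String) :
    ∀ (i : Nat) (acc : List String), (pvBLoop lines i true acc).1 = true := by
  induction lines with
  | nil => intro i acc; rfl
  | cons line rest ih =>
    intro i acc
    rw [pvBLoop]
    simp only [Bool.not_true, Bool.false_eq_true, if_false]
    split
    · rfl
    · exact ih (i + 1) (acc ++ [PySem.Str.rstrip line])

-- started phase: A's index loop equals B's started branch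
theorem pv_started_eq (rest : List String) :
    ∀ (full : List String) (i : Nat) (acc : List String),
      full.drop i = rest →
      pvALoop full i acc =
        ((pvBLoop rest i true acc).2.1,
         (pvBLoop rest i true acc).2.2.getD ((full.length : Int) + 1)) := by
  induction rest with
  | nil =>
    intro full i acc hd
    have hlen : full.length ≤ i := by
      by_contra hlt
      have := List.drop_eq_nil_iff.mp hd
      omega
    rw [pvALoop]
    simp [pvBLoop, Nat.not_lt.mpr hlen]
  | cons line rest ih =>
    intro full i acc hd
    have hlt : i < full.length := by
      by_contra hge
      rw [List.drop_eq_nil_of_le (by omega)] at hd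
      simp at hd
    have hget : PySem.List.pyGet? full (i : Int) = some line := by
      rw [PySem.List.pyGet?_natCast]
      have : full[i]? = (full.drop i).head? := by rw [List.head?_drop]
      rw [this, hd]; rfl
    have htail : full.drop (i + 1) = rest := by
      rw [← List.tail_drop, hd]; rfl
    rw [pvALoop]
    by_cases h2 : PySem.Str.startswith (PySem.Str.strip line) "## " = true
    · simp only [hlt, dif_pos, hget, h2, if_true, pvBLoop]
      simp [h2]
    · simp only [hlt, dif_pos, hget, h2, if_false, pvBLoop]
      rw [ih full (i + 1) (acc ++ [PySem.Str.rstrip line]) htail]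
      simp [h2]

-- search phase: the whole of A equals B's not-started branch
theorem pv_search_eq (lines : List String) :
    ∀ (full : List String) (i : Nat),
      full.drop i = lines →
      (match pvAFind lines i with
       | none => ("", (full.length : Int) + 1)
       | some j =>
         (PySem.Str.join "\n" (pvALoop full j []).1, (pvALoop full j []).2)) =
      (if !(pvBLoop lines i false []).1 then ("", (full.length : Int) + 1)
       else (PySem.Str.join "\n" (pvBLoop lines i false []).2.1,
             (pvBLoop lines i false []).2.2.getD ((full.length : Int) + 1))) := by
  induction lines with
  | nil => intro full i _; simp [pvAFind, pvBLoop]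
  | cons line rest ih =>
    intro full i hd
    have hlt : i < full.length := by
      by_contra hge
      rw [List.drop_eq_nil_of_le (by omega)] at hd
      simp at hd
    have hget : PySem.List.pyGet? full (i : Int) = some line := by
      rw [PySem.List.pyGet?_natCast]
      have : full[i]? = (full.drop i).head? := by rw [List.head?_drop]
      rw [this, hd]; rfl
    have htail : full.drop (i + 1) = rest := by
      rw [← List.tail_drop, hd]; rfl
    by_cases h1 : PySem.Str.startswith (PySem.Str.strip line) "# " = true
    · have h2 := pv_not_sharpsharp line h1
      rw [pvAFind]
      simp only [h1, if_true]
      rw [pvALoop]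
      simp only [hlt, dif_pos, hget, h2, if_false, List.nil_append,
        Bool.false_eq_true]
      rw [pv_started_eq rest full (i + 1) [PySem.Str.rstrip line] htail]
      simp only [pvBLoop, h1, if_true, List.nil_append, Bool.not_true]
      simp [h2, pv_bloop_started]
    · rw [pvAFind]
      simp only [h1, if_false, Bool.false_eq_true]
      rw [ih full (i + 1) htail]
      simp only [pvBLoop, h1]
      simp [h1]

-- ===== VERDICT (by name: the statement is the Claim_ definition above) =====
theorem extract_intro_section_content_from_lines_spec : Claim_equal_extract_intro_section_content_from_lines := by
  intro target_lines _
  unfold Spec_extract_intro_section_content_from_lines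
  unfold extract_intro_section_content_from_lines extract_intro_section_content_from_lines_alt
  have := pv_search_eq target_lines target_lines 0 (by simp)
  simpa using this
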